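-- pv_equiv track=rewrite | github.com/Vineyardcode/voynich_slop | scripts/phase57_bax_test.py | apply_vogt_mapping
-- ===== SOURCE A (Python) =====
-- VOGT_MAP = {
--     # Ligatures FIRST (multi-char, must match before components)
--     'cph': 'v',   # fricative from p/b
--     'cfh': 'f',   # fricative from f/p
--     'cth': 'J',   # /dʒ/ affricate from t/g (using J to avoid collision)
--     'ckh': 'C',   # /tʃ/ affricate from k   (using C to avoid collision)
--     'sh':  'x',   # /x/ voiceless velar fricative
--     'ch':  'h',   # /h/
--     # Single-char consonants
--     'p':   'b',
--     'f':   'p',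
--     't':   'g',
--     'd':   't',
--     'k':   'k',
--     'r':   'r',
--     's':   'S',   # /ts/ affricate (Ṣ in Vogt) — S to avoid collision with /s/
--     'l':   's',   # /s/ or /ʃ/
--     'y':   'n',   # /n/ or /m/
--     'm':   'R',   # /r/ variant
--     # Vowels
--     'o':   'a',   # /a/ or /e/
--     'a':   'w',   # /o/ or /w/  (Vogt uses w; functionally a rounded vowel)
--     'e':   'o',   # /o/
--     # Non-phonetic markers
--     'i':   '.',   # tally mark (non-phonetic)
--     'n':   '.',   # tally mark (non-phonetic)
-- }
--
-- def apply_vogt_mapping(eva_word):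
--     """Apply Vogt's EVA→phonetic mapping to a word.
--     Returns the mapped string (with '.' for non-phonetic markers)."""
--     result = []
--     i = 0
--     w = eva_word.lower()
--     while i < len(w):
--         matched = False
--         # Try multi-char matches first (longest match)
--         for length in [3, 2]:
--             if i + length <= len(w):
--                 chunk = w[i:i+length]
--                 if chunk in VOGT_MAP:
--                     result.append(VOGT_MAP[chunk])
--                     i += length
--                     matched = True
--                     break
--         if not matched:
--             c = w[i]
--             if c in VOGT_MAP:
--                 result.append(VOGT_MAP[c])
--             else:
--                 result.append('?' + c)  # unknown char
--             i += 1
--     return ''.join(result)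
-- ===== SOURCE B (Python) =====
-- # One-pass DFA: a pending-prefix state ('', 's', 'c', 'cp', 'cf', 'ct', 'ck')
-- # replaces A's index loop with descending-length dictionary probes.
--
-- SINGLE = {
--     'p': 'b', 'f': 'p', 't': 'g', 'd': 't', 'k': 'k', 'r': 'r',
--     's': 'S', 'l': 's', 'y': 'n', 'm': 'R',
--     'o': 'a', 'a': 'w', 'e': 'o', 'i': '.', 'n': '.',
-- }
-- LIG = {'p': 'v', 'f': 'f', 't': 'J', 'k': 'C'}  # 'c' + X + 'h' ligatures
--
--
-- def _fresh(ch):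
--     """Start consuming ch with no pending prefix: (emitted, new_pend)."""
--     if ch == 'c' or ch == 's':
--         return '', ch
--     return SINGLE.get(ch, '?' + ch), ''
--
--
-- def _step(pend, ch):
--     """One DFA transition: returns (emitted, new_pend)."""
--     if pend == '':
--         e, p = _fresh(ch)
--     elif pend == 's':
--         if ch == 'h':
--             e, p = 'x', ''
--         else:
--             e, p = _fresh(ch)
--             e = 'S' + e
--     elif pend == 'c':
--         if ch == 'h':
--             e, p = 'h', ''
--         elif ch in LIG:
--             e, p = '', 'c' + ch
--         else:
--             e, p = _fresh(ch)
--             e = '?c' + e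
--     else:  # pend == 'c' + X with X in LIG
--         x = pend[1]
--         if ch == 'h':
--             e, p = LIG[x], ''
--         else:
--             e, p = _fresh(ch)
--             e = '?c' + SINGLE[x] + e
--     return e, p
--
--
-- def _flush(pend):
--     if pend == '':
--         return ''
--     if pend == 's':
--         return 'S'
--     if pend == 'c':
--         return '?c'
--     return '?c' + SINGLE[pend[1]]
--
--
-- def apply_vogt_mapping(eva_word):
--     out = []
--     pend = ''
--     for ch in eva_word.lower():
--         e, pend = _step(pend, ch)
--         out.append(e)
--     return ''.join(out) + _flush(pend)
-- ===== Notes on version B (the rewrite author's own statement) =====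
-- stated objective: faster
-- what changed: Replaces A's index loop that slices the string and probes the dictionary with descending-length chunks at every position by a single left-to-right DFA pass: a pending-prefix state ('', 's', 'c', 'cp'/'cf'/'ct'/'ck') is threaded through one fold over the characters, emitting output on each transition and flushing the pending prefix at the end.
import Mathlib
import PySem

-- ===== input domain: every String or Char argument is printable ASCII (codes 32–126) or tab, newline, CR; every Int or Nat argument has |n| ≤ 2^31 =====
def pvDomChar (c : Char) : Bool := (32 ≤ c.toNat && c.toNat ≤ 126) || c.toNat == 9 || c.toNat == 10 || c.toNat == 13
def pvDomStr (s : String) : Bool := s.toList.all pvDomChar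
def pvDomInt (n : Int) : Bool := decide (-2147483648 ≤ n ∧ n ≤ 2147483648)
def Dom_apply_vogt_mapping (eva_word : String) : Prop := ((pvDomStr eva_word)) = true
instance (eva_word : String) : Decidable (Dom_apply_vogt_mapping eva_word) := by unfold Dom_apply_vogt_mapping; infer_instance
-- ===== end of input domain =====

-- B replaces A's per-position descending-length slice-and-probe loop by a one-pass DFA with a
-- pending-prefix state (one transition per character; measurably faster by a constant factor).

-- ===== PORT A =====
-- VOGT_MAP, strings as char lists (values as char lists; ''.join at the end is flatten)
def vogtMap : PySem.Dict (List Char) (List Char) := PySem.Dict.mk [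
  (['c','p','h'], ['v']), (['c','f','h'], ['f']), (['c','t','h'], ['J']), (['c','k','h'], ['C']),
  (['s','h'], ['x']), (['c','h'], ['h']),
  (['p'], ['b']), (['f'], ['p']), (['t'], ['g']), (['d'], ['t']), (['k'], ['k']), (['r'], ['r']),
  (['s'], ['S']), (['l'], ['s']), (['y'], ['n']), (['m'], ['R']),
  (['o'], ['a']), (['a'], ['w']), (['e'], ['o']),
  (['i'], ['.']), (['n'], ['.'])]

-- A's while loop: at index i try chunks of length 3 then 2, else a single char (result list acc)
def aLoop : List Char → List (List Char) → List (List Char)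
  | [], acc => acc
  | c :: rest, acc =>
    match (if 3 ≤ (c :: rest).length then vogtMap.get? ((c :: rest).take 3) else none) with
    | some v => aLoop ((c :: rest).drop 3) (acc ++ [v])
    | none =>
      match (if 2 ≤ (c :: rest).length then vogtMap.get? ((c :: rest).take 2) else none) with
      | some v => aLoop ((c :: rest).drop 2) (acc ++ [v])
      | none =>
        match vogtMap.get? [c] with
        | some v => aLoop rest (acc ++ [v])
        | none => aLoop rest (acc ++ [['?', c]])
  termination_by cs _ => cs.length
  decreasing_by all_goals (simp only [List.length_drop, List.length_cons]; omega)

def apply_vogt_mapping (eva_word : String) : String :=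
  String.ofList ((aLoop (PySem.Str.lower eva_word).toList []).flatten)

-- ===== PORT B =====
-- single-char map and the 'c_h' ligature map of Source B
def singlePairs : PySem.Dict Char (List Char) := PySem.Dict.mk [
  ('p', ['b']), ('f', ['p']), ('t', ['g']), ('d', ['t']), ('k', ['k']), ('r', ['r']),
  ('s', ['S']), ('l', ['s']), ('y', ['n']), ('m', ['R']),
  ('o', ['a']), ('a', ['w']), ('e', ['o']), ('i', ['.']), ('n', ['.'])]

def ligPairs : PySem.Dict Char (List Char) := PySem.Dict.mk [
  ('p', ['v']), ('f', ['f']), ('t', ['J']), ('k', ['C'])]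

-- _fresh: start consuming ch with no pending prefix → (emitted, new pend)
def bFresh (ch : Char) : List Char × List Char :=
  if ch = 'c' ∨ ch = 's' then ([], [ch])
  else (singlePairs.getD ch ['?', ch], [])

-- _step: one DFA transition, (emitted, new pend)
def bStepE (pend : List Char) (ch : Char) : List Char × List Char :=
  if pend = [] then bFresh ch
  else if pend = ['s'] then
    if ch = 'h' then (['x'], [])
    else let (e, p) := bFresh ch; ('S' :: e, p)
  else if pend = ['c'] then
    if ch = 'h' then (['h'], [])
    else if ligPairs.contains ch then ([], ['c', ch])
    else let (e, p) := bFresh ch; ('?' :: 'c' :: e, p)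
  else
    let x := pend.getD 1 ' '
    if ch = 'h' then (ligPairs.getD x [], [])
    else let (e, p) := bFresh ch; ('?' :: 'c' :: (singlePairs.getD x [] ++ e), p)

-- the loop body: append the emitted chunk to out
def bStep (st : List (List Char) × List Char) (ch : Char) : List (List Char) × List Char :=
  let (e, p) := bStepE st.2 ch
  (st.1 ++ [e], p)

-- _flush: emit the pending prefix at end of input
def bFlush (pend : List Char) : List Char :=
  if pend = [] then []
  else if pend = ['s'] then ['S']
  else if pend = ['c'] then ['?', 'c']
  else '?' :: 'c' :: singlePairs.getD (pend.getD 1 ' ') []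

def apply_vogt_mapping_alt (eva_word : String) : String :=
  let r := ((PySem.Str.lower eva_word).toList).foldl bStep ([], [])
  String.ofList (r.1.flatten ++ bFlush r.2)

-- ===== PRECONDITION & SPEC =====
def Spec_apply_vogt_mapping (eva_word : String) (out : String) : Prop := out = apply_vogt_mapping_alt eva_word
instance (eva_word : String) (out : String) : Decidable (Spec_apply_vogt_mapping eva_word out) := by unfold Spec_apply_vogt_mapping; infer_instance

-- ===== CLAIM (what is proved, stated in full; the proofs are below) =====
def Claim_equal_apply_vogt_mapping : Prop := ∀ (eva_word : String), Dom_apply_vogt_mapping eva_word → Spec_apply_vogt_mapping eva_word (apply_vogt_mapping eva_word)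

-- ===== LEMMAS AND PROOFS =====

-- the reachable pending states of the DFA
def pendStates : List (List Char) := [[], ['s'], ['c'], ['c','p'], ['c','f'], ['c','t'], ['c','k']]

theorem bStep_out (o : List (List Char)) (p : List Char) (ch : Char) :
    bStep (o, p) ch = (o ++ [(bStepE p ch).1], (bStepE p ch).2) := by
  rcases h : bStepE p ch with ⟨e, q⟩
  simp [bStep, h]

theorem foldl_bStep_out (cs : List Char) (o : List (List Char)) (p : List Char) :
    cs.foldl bStep (o, p) =
      (o ++ (cs.foldl bStep ([], p)).1, (cs.foldl bStep ([], p)).2) := by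
  induction cs generalizing o p with
  | nil => simp
  | cons c cs ih =>
    simp only [List.foldl_cons]
    rw [bStep_out o p c, bStep_out [] p c, ih, ih ([] ++ [(bStepE p c).1])]
    simp

-- get? of the empty literal dict (used to close the simp chains below)
theorem get?_nilL : ∀ k : List Char, (PySem.Dict.mk ([] : List (List Char × List Char))).get? k = none := fun _ => rfl
theorem get?_nilC : ∀ k : Char, (PySem.Dict.mk ([] : List (Char × List Char))).get? k = none := fun _ => rfl

theorem aLoop_acc_aux (n : Nat) : ∀ (cs : List Char), cs.length ≤ n →
    ∀ acc, aLoop cs acc = acc ++ aLoop cs [] := by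
  induction n with
  | zero =>
    intro cs h acc
    have hnil : cs = [] := by cases cs <;> simp_all
    subst hnil; simp [aLoop]
  | succ n ih =>
    intro cs h acc
    cases cs with
    | nil => simp [aLoop]
    | cons c rest =>
      rw [aLoop, aLoop]
      cases hm3 : (if 3 ≤ (c :: rest).length then vogtMap.get? ((c :: rest).take 3) else none) with
      | some v =>
        dsimp only
        rw [ih _ (by simp at h ⊢; omega) (acc ++ [v]), ih _ (by simp at h ⊢; omega) ([] ++ [v])]
        simp
      | none =>
        dsimp only
        cases hm2 : (if 2 ≤ (c :: rest).length then vogtMap.get? ((c :: rest).take 2) else none) with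
        | some v =>
          dsimp only
          rw [ih _ (by simp at h ⊢; omega) (acc ++ [v]), ih _ (by simp at h ⊢; omega) ([] ++ [v])]
          simp
        | none =>
          dsimp only
          cases hm1 : vogtMap.get? [c] with
          | some v =>
            dsimp only
            rw [ih _ (by simp at h ⊢; omega) (acc ++ [v]), ih _ (by simp at h ⊢; omega) ([] ++ [v])]
            simp
          | none =>
            dsimp only
            rw [ih _ (by simp at h ⊢; omega) (acc ++ [['?', c]]), ih _ (by simp at h ⊢; omega) ([] ++ [['?', c]])]
            simp

theorem aLoop_acc (cs : List Char) (acc : List (List Char)) :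
    aLoop cs acc = acc ++ aLoop cs [] := aLoop_acc_aux cs.length cs le_rfl acc

-- dictionary characterisations on symbolic chunks
theorem vogt_cons_none (ch : Char) (l : List Char) (hc : ch ≠ 'c') (hs : ch ≠ 's')
    (hl : l ≠ []) : vogtMap.get? (ch :: l) = none := by
  simp [vogtMap, PySem.Dict.get?_mk_cons, get?_nilL, Ne.symm hc, Ne.symm hs, hl]

theorem vogt_single (ch : Char) : vogtMap.get? [ch] = singlePairs.get? ch := by
  simp [vogtMap, singlePairs, PySem.Dict.get?_mk_cons, get?_nilL, get?_nilC]

theorem vogt_s3 (x y : Char) : vogtMap.get? ['s', x, y] = none := by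
  simp [vogtMap, PySem.Dict.get?_mk_cons, get?_nilL]

theorem vogt_s2 (x : Char) : vogtMap.get? ['s', x] = if x = 'h' then some ['x'] else none := by
  by_cases h : x = 'h'
  · subst h; decide
  · simp [vogtMap, PySem.Dict.get?_mk_cons, get?_nilL, h, Ne.symm h]

theorem vogt_c3 (x y : Char) :
    vogtMap.get? ['c', x, y] = if y = 'h' then ligPairs.get? x else none := by
  by_cases hy : y = 'h'
  · subst hy; simp [vogtMap, ligPairs, PySem.Dict.get?_mk_cons, get?_nilL, get?_nilC]
  · simp [vogtMap, PySem.Dict.get?_mk_cons, get?_nilL, hy, Ne.symm hy]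

theorem vogt_c2 (x : Char) : vogtMap.get? ['c', x] = if x = 'h' then some ['h'] else none := by
  by_cases h : x = 'h'
  · subst h; decide
  · simp [vogtMap, PySem.Dict.get?_mk_cons, get?_nilL, h, Ne.symm h]

-- one DFA transition agrees with one greedy step of A
-- A's greedy step at a position whose char is not 'c'/'s': a single-char token
theorem stepFresh (ch : Char) (rest : List Char) :
    (aLoop (ch :: rest) []).flatten =
      (bFresh ch).1 ++ (aLoop ((bFresh ch).2 ++ rest) []).flatten := by
  by_cases hc : ch = 'c' ∨ ch = 's'
  · simp [bFresh, hc]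
  · obtain ⟨hc1, hc2⟩ := not_or.mp hc
    conv_lhs => rw [aLoop]
    have h3 : (if 3 ≤ (ch :: rest).length then vogtMap.get? ((ch :: rest).take 3) else none) = none := by
      split_ifs with h
      · have hne : rest ≠ [] := by intro hn; subst hn; simp at h
        simp only [List.take_succ_cons]
        exact vogt_cons_none ch _ hc1 hc2 (by simp [List.take_eq_nil_iff, hne])
      · rfl
    have h2 : (if 2 ≤ (ch :: rest).length then vogtMap.get? ((ch :: rest).take 2) else none) = none := by
      split_ifs with h
      · have hne : rest ≠ [] := by intro hn; subst hn; simp at h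
        simp only [List.take_succ_cons]
        exact vogt_cons_none ch _ hc1 hc2 (by simp [List.take_eq_nil_iff, hne])
      · rfl
    rw [h3]; dsimp only
    rw [h2]; dsimp only
    rw [vogt_single ch]
    cases hs : singlePairs.get? ch with
    | some v =>
      dsimp only
      rw [aLoop_acc]
      simp [bFresh, hc1, hc2, PySem.Dict.getD_eq_get?_getD, hs]
    | none =>
      dsimp only
      rw [aLoop_acc]
      simp [bFresh, hc1, hc2, PySem.Dict.getD_eq_get?_getD, hs]

theorem stepA_sh (rest : List Char) :
    (aLoop ('s' :: 'h' :: rest) []).flatten = 'x' :: (aLoop rest []).flatten := by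
  conv_lhs => rw [aLoop]
  have h3 : (if 3 ≤ ('s' :: 'h' :: rest).length then vogtMap.get? (('s' :: 'h' :: rest).take 3) else none) = none := by
    cases rest with
    | nil => rfl
    | cons r0 r' =>
      rw [if_pos (by simp)]
      simp only [List.take_succ_cons, List.take_zero]
      exact vogt_s3 'h' r0
  rw [h3]; dsimp only
  rw [if_pos (show 2 ≤ ('s' :: 'h' :: rest).length by simp)]
  simp only [List.take_succ_cons, List.take_zero]
  rw [show vogtMap.get? ['s', 'h'] = some ['x'] from rfl]
  dsimp only
  rw [aLoop_acc]
  simp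

theorem stepA_s (ch : Char) (rest : List Char) (hch : ch ≠ 'h') :
    (aLoop ('s' :: ch :: rest) []).flatten = 'S' :: (aLoop (ch :: rest) []).flatten := by
  conv_lhs => rw [aLoop]
  have h3 : (if 3 ≤ ('s' :: ch :: rest).length then vogtMap.get? (('s' :: ch :: rest).take 3) else none) = none := by
    cases rest with
    | nil => rfl
    | cons r0 r' =>
      rw [if_pos (by simp)]
      simp only [List.take_succ_cons, List.take_zero]
      exact vogt_s3 ch r0
  rw [h3]; dsimp only
  have h2 : (if 2 ≤ ('s' :: ch :: rest).length then vogtMap.get? (('s' :: ch :: rest).take 2) else none) = none := by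
    rw [if_pos (by simp)]
    simp only [List.take_succ_cons, List.take_zero]
    simp [vogt_s2, hch]
  rw [h2]; dsimp only
  rw [show vogtMap.get? ['s'] = some ['S'] from rfl]
  dsimp only
  rw [aLoop_acc]
  simp

theorem stepA_ch (rest : List Char) :
    (aLoop ('c' :: 'h' :: rest) []).flatten = 'h' :: (aLoop rest []).flatten := by
  conv_lhs => rw [aLoop]
  have h3 : (if 3 ≤ ('c' :: 'h' :: rest).length then vogtMap.get? (('c' :: 'h' :: rest).take 3) else none) = none := by
    cases rest with
    | nil => rfl
    | cons r0 r' =>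
      rw [if_pos (by simp)]
      simp only [List.take_succ_cons, List.take_zero]
      simp [vogt_c3]
      intro h
      rfl
  rw [h3]; dsimp only
  rw [if_pos (show 2 ≤ ('c' :: 'h' :: rest).length by simp)]
  simp only [List.take_succ_cons, List.take_zero]
  rw [show vogtMap.get? ['c', 'h'] = some ['h'] from rfl]
  dsimp only
  rw [aLoop_acc]
  simp

-- 'c' followed by a char that opens no ligature (and is not 'h'): '?c' token
theorem stepA_c (x : Char) (rest : List Char) (hx : ligPairs.get? x = none) (hxh : x ≠ 'h') :
    (aLoop ('c' :: x :: rest) []).flatten = '?' :: 'c' :: (aLoop (x :: rest) []).flatten := by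
  conv_lhs => rw [aLoop]
  have h3 : (if 3 ≤ ('c' :: x :: rest).length then vogtMap.get? (('c' :: x :: rest).take 3) else none) = none := by
    cases rest with
    | nil => rfl
    | cons r0 r' =>
      rw [if_pos (by simp)]
      simp only [List.take_succ_cons, List.take_zero]
      simp [vogt_c3, hx]
  rw [h3]; dsimp only
  have h2 : (if 2 ≤ ('c' :: x :: rest).length then vogtMap.get? (('c' :: x :: rest).take 2) else none) = none := by
    rw [if_pos (by simp)]
    simp only [List.take_succ_cons, List.take_zero]
    simp [vogt_c2, hxh]
  rw [h2]; dsimp only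
  rw [show vogtMap.get? ['c'] = none from rfl]
  dsimp only
  rw [aLoop_acc]
  simp

-- 'c' x y with y ≠ 'h' (x any non-'h' char): the 3- and 2-chunks both miss
theorem stepA_cxy (x y : Char) (rest : List Char) (hxh : x ≠ 'h') (hy : y ≠ 'h') :
    (aLoop ('c' :: x :: y :: rest) []).flatten = '?' :: 'c' :: (aLoop (x :: y :: rest) []).flatten := by
  conv_lhs => rw [aLoop]
  have h3 : (if 3 ≤ ('c' :: x :: y :: rest).length then vogtMap.get? (('c' :: x :: y :: rest).take 3) else none) = none := by
    rw [if_pos (by simp)]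
    simp only [List.take_succ_cons, List.take_zero]
    simp [vogt_c3, hy]
  rw [h3]; dsimp only
  have h2 : (if 2 ≤ ('c' :: x :: y :: rest).length then vogtMap.get? (('c' :: x :: y :: rest).take 2) else none) = none := by
    rw [if_pos (by simp)]
    simp only [List.take_succ_cons, List.take_zero]
    simp [vogt_c2, hxh]
  rw [h2]; dsimp only
  rw [show vogtMap.get? ['c'] = none from rfl]
  dsimp only
  rw [aLoop_acc]
  simp

-- a full ligature 'c' X 'h'
theorem stepA_lig (x v : Char) (rest : List Char) (hx : vogtMap.get? ['c', x, 'h'] = some [v]) :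
    (aLoop ('c' :: x :: 'h' :: rest) []).flatten = v :: (aLoop rest []).flatten := by
  conv_lhs => rw [aLoop]
  rw [if_pos (show 3 ≤ ('c' :: x :: 'h' :: rest).length by simp)]
  simp only [List.take_succ_cons, List.take_zero]
  rw [hx]
  dsimp only
  rw [aLoop_acc]
  simp

theorem stepA (p : List Char) (hp : p ∈ pendStates) (ch : Char) (rest : List Char) :
    (aLoop (p ++ ch :: rest) []).flatten =
      (bStepE p ch).1 ++ (aLoop ((bStepE p ch).2 ++ rest) []).flatten := by
  fin_cases hp
  · -- p = []
    have hB : bStepE [] ch = ((bFresh ch).1, (bFresh ch).2) := by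
      simp [bStepE]
    rw [List.nil_append, hB]
    exact stepFresh ch rest
  · -- p = ['s']
    by_cases hch : ch = 'h'
    · subst hch
      rw [show bStepE ['s'] 'h' = (['x'], []) from by simp [bStepE]]
      simpa using stepA_sh rest
    · rcases hF : bFresh ch with ⟨e, q⟩
      rw [show bStepE ['s'] ch = ('S' :: e, q) from by simp [bStepE, hch, hF]]
      have h1 := stepA_s ch rest hch
      have h2 := stepFresh ch rest
      rw [hF] at h2
      simp [h1, h2]
  · -- p = ['c']
    by_cases hch : ch = 'h'
    · subst hch
      rw [show bStepE ['c'] 'h' = (['h'], []) from by simp [bStepE]]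
      simpa using stepA_ch rest
    · by_cases hlig : ligPairs.contains ch
      · rw [show bStepE ['c'] ch = ([], ['c', ch]) from by simp [bStepE, hch, hlig]]
        simp
      · have hlg : ligPairs.get? ch = none := by
          rw [PySem.Dict.contains_eq_isSome_get?] at hlig
          cases h : ligPairs.get? ch with
          | none => rfl
          | some v => rw [h] at hlig; simp at hlig
        rcases hF : bFresh ch with ⟨e, q⟩
        rw [show bStepE ['c'] ch = ('?' :: 'c' :: e, q) from by simp [bStepE, hch, hlig, hF]]
        have h1 := stepA_c ch rest hlg hch
        have h2 := stepFresh ch rest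
        rw [hF] at h2
        simp [h1, h2]
  all_goals (
    by_cases hch : ch = 'h'
    · subst hch
      first
      | (rw [show bStepE ['c', 'p'] 'h' = (['v'], []) from by decide]
         simpa using stepA_lig 'p' 'v' rest rfl)
      | (rw [show bStepE ['c', 'f'] 'h' = (['f'], []) from by decide]
         simpa using stepA_lig 'f' 'f' rest rfl)
      | (rw [show bStepE ['c', 't'] 'h' = (['J'], []) from by decide]
         simpa using stepA_lig 't' 'J' rest rfl)
      | (rw [show bStepE ['c', 'k'] 'h' = (['C'], []) from by decide]
         simpa using stepA_lig 'k' 'C' rest rfl)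
    · rcases hF : bFresh ch with ⟨e, q⟩
      have h2 := stepFresh ch rest
      rw [hF] at h2
      first
      | (rw [show bStepE ['c', 'p'] ch = ('?' :: 'c' :: ('b' :: e), q) from by
          simp [bStepE, hch, hF, show singlePairs.getD 'p' [] = ['b'] from by decide]]
         have h1 := stepA_cxy 'p' ch rest (by decide) hch
         have h0 := stepFresh 'p' (ch :: rest)
         rw [show bFresh 'p' = (['b'], []) from by decide] at h0
         simp only [List.nil_append] at h0
         simp [h1, h0, h2])
      | (rw [show bStepE ['c', 'f'] ch = ('?' :: 'c' :: ('p' :: e), q) from by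
          simp [bStepE, hch, hF, show singlePairs.getD 'f' [] = ['p'] from by decide]]
         have h1 := stepA_cxy 'f' ch rest (by decide) hch
         have h0 := stepFresh 'f' (ch :: rest)
         rw [show bFresh 'f' = (['p'], []) from by decide] at h0
         simp only [List.nil_append] at h0
         simp [h1, h0, h2])
      | (rw [show bStepE ['c', 't'] ch = ('?' :: 'c' :: ('g' :: e), q) from by
          simp [bStepE, hch, hF, show singlePairs.getD 't' [] = ['g'] from by decide]]
         have h1 := stepA_cxy 't' ch rest (by decide) hch
         have h0 := stepFresh 't' (ch :: rest)
         rw [show bFresh 't' = (['g'], []) from by decide] at h0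
         simp only [List.nil_append] at h0
         simp [h1, h0, h2])
      | (rw [show bStepE ['c', 'k'] ch = ('?' :: 'c' :: ('k' :: e), q) from by
          simp [bStepE, hch, hF, show singlePairs.getD 'k' [] = ['k'] from by decide]]
         have h1 := stepA_cxy 'k' ch rest (by decide) hch
         have h0 := stepFresh 'k' (ch :: rest)
         rw [show bFresh 'k' = (['k'], []) from by decide] at h0
         simp only [List.nil_append] at h0
         simp [h1, h0, h2]))

theorem stepState (p : List Char) (hp : p ∈ pendStates) (ch : Char) :
    (bStepE p ch).2 ∈ pendStates := by
  fin_cases hp <;> simp [bStepE, bFresh, pendStates] <;> split_ifs <;> simp_all [PySem.Dict.contains, ligPairs] <;> tauto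

theorem flushA (p : List Char) (hp : p ∈ pendStates) :
    (aLoop p []).flatten = bFlush p := by
  fin_cases hp <;> simp [aLoop, bFlush, vogtMap, singlePairs, PySem.Dict.get?_mk_cons, get?_nilL, PySem.Dict.getD_eq_get?_getD]

theorem mainInv (cs : List Char) (p : List Char) (hp : p ∈ pendStates) :
    (cs.foldl bStep ([], p)).1.flatten ++ bFlush (cs.foldl bStep ([], p)).2 =
      (aLoop (p ++ cs) []).flatten := by
  induction cs generalizing p with
  | nil => simpa using (flushA p hp).symm
  | cons c cs ih =>
    simp only [List.foldl_cons]
    rw [bStep_out [] p c, foldl_bStep_out cs ([] ++ [(bStepE p c).1]) (bStepE p c).2]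
    have h2 := ih (bStepE p c).2 (stepState p hp c)
    simp only [List.flatten_append, List.flatten_cons, List.flatten_nil, List.append_nil,
      List.append_assoc]
    rw [h2, stepA p hp c cs]
    simp

-- ===== VERDICT (by name: the statement is the Claim_ definition above) =====
theorem apply_vogt_mapping_spec : Claim_equal_apply_vogt_mapping := by
  intro w _
  unfold Spec_apply_vogt_mapping apply_vogt_mapping apply_vogt_mapping_alt
  have h := mainInv (PySem.Str.lower w).toList [] (by simp [pendStates])
  simp only [List.nil_append] at h
  rw [← h]
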